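-- pv_equiv track=rewrite | github.com/lozturner/personal-ai-system | voice_dispatch/sip_registrar.py | _add_via_and_forward
-- ===== SOURCE A (Python) =====
-- def _add_via_and_forward(raw: str, via: str) -> str:
--     """Add our Via header as the topmost Via."""
--     lines = raw.split("\r\n")
--     result = [lines[0]]  # Request line
--     via_inserted = False
--     for line in lines[1:]:
--         if not via_inserted and (line.lower().startswith("via:") or line == ""):
--             result.append(f"Via: {via}")
--             via_inserted = True
--         result.append(line)
--     if not via_inserted:
--         result.insert(1, f"Via: {via}")
--     return "\r\n".join(result)
-- ===== SOURCE B (Python) =====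
-- def _add_via_and_forward(raw: str, via: str) -> str:
--     """Add our Via header as the topmost Via.
--
--     Works on the raw text directly with str.partition("\r\n"): keep the text
--     already walked as a growing prefix and splice the header string into the
--     message before the first Via/empty line; no line list is ever built.
--     """
--     ins = "Via: " + via + "\r\n"
--     head, mark, tail = raw.partition("\r\n")
--     if not mark:
--         return raw + "\r\n" + "Via: " + via
--     pre = head + mark
--     s = tail
--     while True:
--         if s[:4].lower().startswith("via:") or s.startswith("\r\n") or s == "":
--             return pre + ins + s
--         line, mark, rest = s.partition("\r\n")
--         if not mark:
--             return head + "\r\n" + ins + tail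
--         pre += line + mark
--         s = rest
-- ===== Notes on version B (the rewrite author's own statement) =====
-- stated objective: alternative
-- what changed: B never builds a line list: it walks the raw text with str.partition("\r\n"), keeping the already-walked text as a growing string prefix, and splices the header string into the message before the first Via/empty line (A splits into lines and streams them into a new list under a via_inserted flag).
import Mathlib
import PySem

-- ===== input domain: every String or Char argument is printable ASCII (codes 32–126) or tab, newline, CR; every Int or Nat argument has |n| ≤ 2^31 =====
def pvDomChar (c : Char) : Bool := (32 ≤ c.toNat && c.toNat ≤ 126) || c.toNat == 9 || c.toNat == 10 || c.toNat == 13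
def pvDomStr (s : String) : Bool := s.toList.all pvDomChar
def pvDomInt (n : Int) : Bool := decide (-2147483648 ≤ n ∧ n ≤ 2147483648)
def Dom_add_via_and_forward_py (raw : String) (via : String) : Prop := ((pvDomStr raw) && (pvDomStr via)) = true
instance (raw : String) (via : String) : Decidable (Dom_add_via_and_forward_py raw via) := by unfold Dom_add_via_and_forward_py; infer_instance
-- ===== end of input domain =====

-- B never builds a line list: it walks the raw text with a hand-ported str.partition("\r\n")
-- and splices the header string into the message before the first Via/empty line (objective: alternative).

-- the test `line.lower().startswith("via:") or line == ""` A applies to a split-off line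
def pvPred (line : List Char) : Bool :=
  PySem.Chars.startswith (PySem.Chars.lower line) "via:".toList || line == ([] : List Char)

-- ===== PORT A =====
-- the body of A's for-loop, on the state (result, via_inserted)
def pvStepA (V : List Char) (st : List (List Char) × Bool) (line : List Char) :
    List (List Char) × Bool :=
  if !st.2 && pvPred line then (st.1 ++ [V, line], true) else (st.1 ++ [line], st.2)

def add_via_and_forward_py (raw : String) (via : String) : String :=
  let lines := PySem.Chars.splitOn raw.toList ['\r', '\n']
  -- lines[0]/lines[1:] taken by pattern match: split on a non-empty separator never returns []
  match lines with
  | [] => ""  -- unreachable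
  | l0 :: rest =>
    let V := "Via: ".toList ++ via.toList
    let st := rest.foldl (pvStepA V) ([l0], false)
    let result := if !st.2 then PySem.List.insert st.1 1 V else st.1
    String.ofList (PySem.Chars.join ['\r', '\n'] result)

-- ===== PORT B =====
-- s.partition("\r\n"), hand-ported for this fixed two-char separator (exact: `none` iff the
-- separator is absent, else `some (head, tail)` around its first occurrence)
def pvPartition : List Char → Option (List Char × List Char)
  | [] => none
  | [_] => none
  | c :: d :: rest =>
    if c = '\r' ∧ d = '\n' then some ([], rest)
    else (pvPartition (d :: rest)).map (fun p => (c :: p.1, p.2))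

-- B's loop cites this fact about its own helper for termination
theorem pvPartition_eq : ∀ (s h u : List Char), pvPartition s = some (h, u) →
    s = h ++ '\r' :: '\n' :: u := by
  intro s
  induction s using pvPartition.induct with
  | case1 => intro h u hs; simp [pvPartition] at hs
  | case2 _ => intro h u hs; simp [pvPartition] at hs
  | case3 c d rest hcd =>
    obtain ⟨rfl, rfl⟩ := hcd
    intro h u hs
    rw [pvPartition, if_pos ⟨rfl, rfl⟩] at hs
    simp at hs
    obtain ⟨h1, h2⟩ := hs
    simp [h1, h2]
  | case4 c d rest hcd ih =>
    intro h u hs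
    rw [pvPartition, if_neg hcd] at hs
    cases hp : pvPartition (d :: rest) with
    | none => rw [hp] at hs; simp at hs
    | some p =>
      rw [hp] at hs
      simp at hs
      obtain ⟨h1, h2⟩ := hs
      have := ih p.1 p.2 (by rw [hp])
      rw [← h1, this, h2]
      simp

-- the test B applies to the text s from the start of the current line:
-- `s[:4].lower().startswith("via:") or s.startswith("\r\n") or s == ""`
def pvCond (s : List Char) : Bool :=
  PySem.Chars.startswith (PySem.Chars.lower (PySem.List.slice s none (some 4))) "via:".toList
  || PySem.Chars.startswith s ['\r', '\n'] || s == ([] : List Char)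

-- B's while loop, on the state (pre, s); hd/tl are `head`/`tail` of the first partition
def pvLoop (ins hd tl : List Char) (pre s : List Char) : List Char :=
  if pvCond s then pre ++ ins ++ s
  else
    match hp : pvPartition s with
    | none => hd ++ '\r' :: '\n' :: (ins ++ tl)
    | some (line, rest) => pvLoop ins hd tl (pre ++ line ++ ['\r', '\n']) rest
termination_by s.length
decreasing_by
  have h := pvPartition_eq s line rest hp
  rw [h]; simp; omega

def add_via_and_forward_py_alt (raw : String) (via : String) : String :=
  let ins := "Via: ".toList ++ via.toList ++ ['\r', '\n']
  match pvPartition raw.toList with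
  | none => String.ofList (raw.toList ++ '\r' :: '\n' :: ("Via: ".toList ++ via.toList))
  | some (hd, tl) => String.ofList (pvLoop ins hd tl (hd ++ ['\r', '\n']) tl)

-- ===== PRECONDITION & SPEC =====
def Spec_add_via_and_forward_py (raw : String) (via : String) (out : String) : Prop := out = add_via_and_forward_py_alt raw via
instance (raw : String) (via : String) (out : String) : Decidable (Spec_add_via_and_forward_py raw via out) := by unfold Spec_add_via_and_forward_py; infer_instance

-- ===== CLAIM (what is proved, stated in full; the proofs are below) =====
def Claim_equal_add_via_and_forward_py : Prop := ∀ (raw : String) (via : String), Dom_add_via_and_forward_py raw via → Spec_add_via_and_forward_py raw via (add_via_and_forward_py raw via)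

-- ===== LEMMAS AND PROOFS =====

-- the separator as a Boolean prefix test, in the three list shapes
theorem pvPre2 (c d : Char) (t : List Char) :
    (['\r', '\n'].isPrefixOf (c :: d :: t)) = true ↔ (c = '\r' ∧ d = '\n') := by
  simp only [List.isPrefixOf, Bool.and_eq_true, beq_iff_eq]
  constructor
  · rintro ⟨a, b, -⟩; exact ⟨a.symm, b.symm⟩
  · rintro ⟨a, b⟩; exact ⟨a.symm, b.symm, trivial⟩

theorem pvPre_one (c : Char) : (['\r', '\n'].isPrefixOf [c]) = false := by
  simp [List.isPrefixOf]

theorem pvPre2_false (c d : Char) (t : List Char) (hcd : ¬ (c = '\r' ∧ d = '\n')) :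
    (['\r', '\n'].isPrefixOf (c :: d :: t)) = false := by
  rw [Bool.eq_false_iff, ne_eq, pvPre2]; exact hcd

-- A-side: the loop once the flag is set just appends the remaining lines
theorem pvFold_true (V : List Char) (rest acc : List (List Char)) :
    rest.foldl (pvStepA V) (acc, true) = (acc ++ rest, true) := by
  induction rest generalizing acc with
  | nil => simp
  | cons x xs ih =>
    rw [List.foldl_cons, show pvStepA V (acc, true) x = (acc ++ [x], true) by
          simp [pvStepA], ih]
    simp

-- A-side: the loop from the unset flag, characterised by the first matching index
theorem pvFold_false (V : List Char) (rest acc : List (List Char)) :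
    rest.foldl (pvStepA V) (acc, false) =
    match rest.findIdx? pvPred with
    | none => (acc ++ rest, false)
    | some i => (acc ++ rest.take i ++ V :: rest.drop i, true) := by
  induction rest generalizing acc with
  | nil => simp
  | cons x xs ih =>
    by_cases hx : pvPred x
    · rw [List.foldl_cons, show pvStepA V (acc, false) x = (acc ++ [V, x], true) by
            simp [pvStepA, hx], pvFold_true]
      simp [List.findIdx?_cons, hx]
    · rw [List.foldl_cons, show pvStepA V (acc, false) x = (acc ++ [x], false) by
            simp [pvStepA, hx], ih]
      rw [List.findIdx?_cons]
      simp only [hx, Bool.false_eq_true, if_false]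
      cases hf : xs.findIdx? pvPred with
      | none => simp
      | some i => simp

-- splitOn's worker: the accumulator is a reversed prefix of the result
theorem pvGo_acc (sep : List Char) (f : Nat) : ∀ (l cur : List Char) (acc : List (List Char)),
    PySem.Chars.splitOn.go sep f l cur acc = acc.reverse ++ PySem.Chars.splitOn.go sep f l cur [] := by
  induction f with
  | zero => intro l cur acc; simp [PySem.Chars.splitOn.go]
  | succ n ih =>
    intro l cur acc
    cases l with
    | nil => simp [PySem.Chars.splitOn.go]
    | cons c rest =>
      rw [PySem.Chars.splitOn.go]
      conv_rhs => rw [PySem.Chars.splitOn.go]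
      split
      · rw [ih _ _ (cur.reverse :: acc), ih _ _ [cur.reverse]]
        simp
      · rw [ih _ _ acc]

-- splitOn's worker ignores the exact fuel once it is at least the text length
theorem pvGo_fuel (f1 : Nat) : ∀ (f2 : Nat) (l cur : List Char) (acc : List (List Char)),
    l.length ≤ f1 → l.length ≤ f2 →
    PySem.Chars.splitOn.go ['\r', '\n'] f1 l cur acc = PySem.Chars.splitOn.go ['\r', '\n'] f2 l cur acc := by
  induction f1 using Nat.strong_induction_on with
  | _ f1 ih =>
    intro f2 l cur acc h1 h2
    cases l with
    | nil =>
      cases f1 <;> cases f2 <;> simp [PySem.Chars.splitOn.go]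
    | cons c rest =>
      simp at h1 h2
      cases f1 with
      | zero => omega
      | succ a =>
        cases f2 with
        | zero => omega
        | succ b =>
          rw [PySem.Chars.splitOn.go]
          conv_rhs => rw [PySem.Chars.splitOn.go]
          split
          · exact ih a (by omega) b _ _ _ (by simp; omega) (by simp; omega)
          · exact ih a (by omega) b _ _ _ (by omega) (by omega)

-- splitOn of a separator-free text is that text as a single piece
theorem pvGo_none (l : List Char) : ∀ (f : Nat) (cur : List Char) (acc : List (List Char)),
    pvPartition l = none → l.length ≤ f →
    PySem.Chars.splitOn.go ['\r', '\n'] f l cur acc = acc.reverse ++ [cur.reverse ++ l] := by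
  induction l with
  | nil => intro f cur acc _ _; cases f <;> simp [PySem.Chars.splitOn.go]
  | cons c rest ih =>
    intro f cur acc hn hf
    have hrest : pvPartition rest = none ∧ (['\r', '\n'].isPrefixOf (c :: rest)) = false := by
      cases rest with
      | nil => exact ⟨rfl, pvPre_one c⟩
      | cons d t =>
        rw [pvPartition] at hn
        by_cases hcd : c = '\r' ∧ d = '\n'
        · rw [if_pos hcd] at hn; simp at hn
        · rw [if_neg hcd] at hn
          refine ⟨?_, ?_⟩
          · cases hp : pvPartition (d :: t) with
            | none => rfl
            | some p => rw [hp] at hn; simp at hn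
          · exact pvPre2_false c d t hcd
    cases f with
    | zero => simp at hf
    | succ g =>
      rw [PySem.Chars.splitOn.go]
      simp only [hrest.2, Bool.false_eq_true, if_false]
      rw [ih g (c :: cur) acc hrest.1 (by simp at hf; omega)]
      simp

-- splitOn of text with a first separator: head piece, then split the tail
theorem pvGo_some : ∀ (l h u : List Char) (f : Nat) (cur : List Char) (acc : List (List Char)),
    pvPartition l = some (h, u) → l.length ≤ f →
    PySem.Chars.splitOn.go ['\r', '\n'] f l cur acc =
      acc.reverse ++ ((cur.reverse ++ h) :: PySem.Chars.splitOn u ['\r', '\n']) := by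
  intro l
  induction l using pvPartition.induct with
  | case1 => intro h u f cur acc hs; simp [pvPartition] at hs
  | case2 _ => intro h u f cur acc hs; simp [pvPartition] at hs
  | case3 c d rest hcd =>
    obtain ⟨rfl, rfl⟩ := hcd
    intro h u f cur acc hs hf
    rw [pvPartition, if_pos ⟨rfl, rfl⟩] at hs
    simp at hs
    obtain ⟨h1, h2⟩ := hs
    cases f with
    | zero => simp at hf
    | succ g =>
      rw [PySem.Chars.splitOn.go]
      simp only [show (['\r', '\n'].isPrefixOf ('\r' :: '\n' :: rest)) = true from (pvPre2 _ _ _).mpr ⟨rfl, rfl⟩, if_true]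
      simp only [List.length_cons] at hf
      rw [show List.drop ['\r', '\n'].length ('\r' :: '\n' :: rest) = rest by simp]
      rw [pvGo_acc]
      rw [pvGo_fuel g (rest.length + 1) rest [] [] (by omega) (by omega)]
      rw [show PySem.Chars.splitOn.go ['\r', '\n'] (rest.length + 1) rest [] [] = PySem.Chars.splitOn rest ['\r', '\n'] from rfl]
      simp [h1, h2]
  | case4 c d rest hcd ih =>
    intro h u f cur acc hs hf
    rw [pvPartition, if_neg hcd] at hs
    cases hp : pvPartition (d :: rest) with
    | none => rw [hp] at hs; simp at hs
    | some p =>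
      rw [hp] at hs; simp at hs
      obtain ⟨h1, h2⟩ := hs
      cases f with
      | zero => simp at hf
      | succ g =>
        rw [PySem.Chars.splitOn.go]
        have hpre : (['\r', '\n'].isPrefixOf (c :: d :: rest)) = false := pvPre2_false c d rest hcd
        simp only [hpre, Bool.false_eq_true, if_false]
        rw [ih p.1 p.2 g (c :: cur) acc (by rw [hp]) (by simp at hf ⊢; omega)]
        rw [← h1, h2]
        simp

-- splitOn, characterised through pvPartition
theorem pvSplit_part (s : List Char) :
    PySem.Chars.splitOn s ['\r', '\n'] =
      match pvPartition s with
      | none => [s]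
      | some (h, u) => h :: PySem.Chars.splitOn u ['\r', '\n'] := by
  cases hp : pvPartition s with
  | none =>
    rw [show PySem.Chars.splitOn s ['\r', '\n'] = PySem.Chars.splitOn.go ['\r', '\n'] (s.length + 1) s [] [] from rfl]
    rw [pvGo_none s (s.length + 1) [] [] hp (by omega)]
    simp
  | some p =>
    rw [show PySem.Chars.splitOn s ['\r', '\n'] = PySem.Chars.splitOn.go ['\r', '\n'] (s.length + 1) s [] [] from rfl]
    rw [pvGo_some s p.1 p.2 (s.length + 1) [] [] (by rw [hp]) (by omega)]
    simp

-- splitOn never returns the empty list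
theorem pvSplit_ne_nil (s : List Char) : PySem.Chars.splitOn s ['\r', '\n'] ≠ [] := by
  rw [pvSplit_part]
  cases hp : pvPartition s with
  | none => simp
  | some p => simp

-- join of a cons with a nonempty tail
theorem pvJoin_cons (a : List Char) (l : List (List Char)) (hl : l ≠ []) :
    PySem.Chars.join ['\r', '\n'] (a :: l) = a ++ '\r' :: '\n' :: PySem.Chars.join ['\r', '\n'] l := by
  cases l with
  | nil => exact absurd rfl hl
  | cons b t => rw [PySem.Chars.join_cons_cons]; simp

-- join undoes splitOn
theorem pvJoin_split (n : Nat) : ∀ (s : List Char), s.length ≤ n →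
    PySem.Chars.join ['\r', '\n'] (PySem.Chars.splitOn s ['\r', '\n']) = s := by
  induction n with
  | zero =>
    intro s hs
    have : s = [] := by cases s with | nil => rfl | cons a b => simp at hs
    subst this
    rw [pvSplit_part]; simp [pvPartition, PySem.Chars.join_singleton]
  | succ n ih =>
    intro s hs
    rw [pvSplit_part]
    cases hp : pvPartition s with
    | none => simp [PySem.Chars.join_singleton]
    | some p =>
      simp only []
      have hse := pvPartition_eq s p.1 p.2 hp
      rw [pvJoin_cons p.1 _ (pvSplit_ne_nil p.2)]
      rw [ih p.2 (by rw [hse] at hs; simp at hs; omega)]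
      exact hse.symm

-- a prefix containing no '\r' is unaffected by text past a '\r'
theorem pvSw_append_cr (p : List Char) : ∀ (u v : List Char), '\r' ∉ p →
    PySem.Chars.startswith (u ++ '\r' :: v) p = PySem.Chars.startswith u p := by
  induction p with
  | nil => intro u v _; simp [PySem.Chars.startswith, List.isPrefixOf]
  | cons a p ih =>
    intro u v hp
    simp at hp
    cases u with
    | nil =>
      have ha : (a == '\r') = false := by
        simp only [beq_eq_false_iff_ne, ne_eq]
        exact fun h => hp.1 h.symm
      simp only [List.nil_append]
      rw [show PySem.Chars.startswith ('\r' :: v) (a :: p) = ((a == '\r') && p.isPrefixOf v) from rfl]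
      rw [ha]
      rfl
    | cons b u' =>
      simp only [List.cons_append]
      rw [show PySem.Chars.startswith (b :: (u' ++ '\r' :: v)) (a :: p) = ((a == b) && p.isPrefixOf (u' ++ '\r' :: v)) from rfl]
      rw [show PySem.Chars.startswith (b :: u') (a :: p) = ((a == b) && p.isPrefixOf u') from rfl]
      have := ih u' v hp.2
      simp only [PySem.Chars.startswith] at this
      rw [this]

-- startswith only reads as many characters as the prefix is long
theorem pvSw_take (p s : List Char) (k : Nat) (hk : p.length ≤ k) :
    PySem.Chars.startswith (s.take k) p = PySem.Chars.startswith s p := by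
  rw [Bool.eq_iff_iff, PySem.Chars.startswith_iff, PySem.Chars.startswith_iff]
  rw [List.prefix_take_iff]
  constructor
  · exact fun h => h.1
  · exact fun h => ⟨h, hk⟩

-- lower distributes over append and take
theorem pvLower_append (u v : List Char) :
    PySem.Chars.lower (u ++ v) = PySem.Chars.lower u ++ PySem.Chars.lower v := by
  simp [PySem.Chars.lower]

theorem pvLower_take (s : List Char) (k : Nat) :
    PySem.Chars.lower (s.take k) = (PySem.Chars.lower s).take k := by
  simp [PySem.Chars.lower, List.map_take]

-- B's string-level test equals A's line-level test: separator-free case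
theorem pvCond_none (s : List Char) (hn : pvPartition s = none) : pvCond s = pvPred s := by
  have h1 : PySem.Chars.startswith (PySem.Chars.lower (PySem.List.slice s none (some 4))) "via:".toList
      = PySem.Chars.startswith (PySem.Chars.lower s) "via:".toList := by
    rw [PySem.List.slice_to s (by norm_num)]
    rw [show ((4 : Int)).toNat = 4 from rfl]
    rw [pvLower_take, pvSw_take _ _ 4 (by decide)]
  have h2 : PySem.Chars.startswith s ['\r', '\n'] = false := by
    cases s with
    | nil => simp [PySem.Chars.startswith, List.isPrefixOf]
    | cons c rest =>
      cases rest with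
      | nil => exact pvPre_one c
      | cons d t =>
        rw [pvPartition] at hn
        by_cases hcd : c = '\r' ∧ d = '\n'
        · rw [if_pos hcd] at hn; simp at hn
        · exact pvPre2_false c d t hcd
  unfold pvCond pvPred
  rw [h1, h2]
  simp

-- B's string-level test equals A's line-level test: first line split off
theorem pvCond_some (s h u : List Char) (hs : pvPartition s = some (h, u)) :
    pvCond s = pvPred h := by
  have hse := pvPartition_eq s h u hs
  have h1 : PySem.Chars.startswith (PySem.Chars.lower (PySem.List.slice s none (some 4))) "via:".toList
      = PySem.Chars.startswith (PySem.Chars.lower h) "via:".toList := by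
    rw [PySem.List.slice_to s (by norm_num)]
    rw [show ((4 : Int)).toNat = 4 from rfl]
    rw [pvLower_take, pvSw_take _ _ 4 (by decide)]
    rw [hse, pvLower_append]
    rw [show PySem.Chars.lower ('\r' :: '\n' :: u) = '\r' :: PySem.Chars.lower ('\n' :: u) from rfl]
    rw [pvSw_append_cr _ _ _ (by decide)]
  have h2 : PySem.Chars.startswith s ['\r', '\n'] = (h == ([] : List Char)) := by
    cases hh : h with
    | nil =>
      rw [hh] at hse; rw [hse]
      exact (pvPre2 _ _ _).mpr ⟨rfl, rfl⟩
    | cons a h' =>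
      rw [hh] at hse; rw [hse]
      simp only [List.cons_append]
      cases h' with
      | nil =>
        show (['\r', '\n'].isPrefixOf (a :: '\r' :: '\n' :: u)) = _
        rw [pvPre2_false a '\r' _ (by rintro ⟨-, hx⟩; exact absurd hx (by decide))]
        simp
      | cons b h'' =>
        rw [hse, hh] at hs
        have hab : ¬ (a = '\r' ∧ b = '\n') := by
          intro hab
          rw [show (a :: b :: h'') ++ '\r' :: '\n' :: u = a :: b :: (h'' ++ '\r' :: '\n' :: u) by simp] at hs
          rw [pvPartition, if_pos hab] at hs
          simp at hs
        show (['\r', '\n'].isPrefixOf (a :: b :: (h'' ++ '\r' :: '\n' :: u))) = _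
        rw [pvPre2_false a b _ hab]
        simp
  have h3 : (s == ([] : List Char)) = false := by
    rw [hse]; cases h <;> simp
  unfold pvCond pvPred
  rw [h1, h2, h3]
  simp

-- B's loop, characterised by the first matching line of the remaining text
theorem pvLoop_eq (V hd tl : List Char) : ∀ (n : Nat) (s : List Char), s.length ≤ n → ∀ (pre : List Char),
    pvLoop (V ++ ['\r', '\n']) hd tl pre s =
      match (PySem.Chars.splitOn s ['\r', '\n']).findIdx? pvPred with
      | none => hd ++ '\r' :: '\n' :: ((V ++ ['\r', '\n']) ++ tl)
      | some i => pre ++ PySem.Chars.join ['\r', '\n']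
          ((PySem.Chars.splitOn s ['\r', '\n']).take i ++ V :: (PySem.Chars.splitOn s ['\r', '\n']).drop i) := by
  intro n
  induction n using Nat.strong_induction_on with
  | _ n ih =>
    intro s hs pre
    by_cases hc : pvCond s = true
    · rw [pvLoop, if_pos hc]
      have hne := pvSplit_ne_nil s
      cases hL : PySem.Chars.splitOn s ['\r', '\n'] with
      | nil => exact absurd hL hne
      | cons x L' =>
        have hx : pvPred x = true := by
          rw [pvSplit_part] at hL
          cases hp : pvPartition s with
          | none =>
            rw [hp] at hL; simp at hL
            rw [← hL.1, ← pvCond_none s hp]; exact hc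
          | some p =>
            rw [hp] at hL; simp at hL
            rw [← hL.1, ← pvCond_some s p.1 p.2 (by rw [hp])]; exact hc
        rw [List.findIdx?_cons, if_pos hx]
        simp only [List.take_zero, List.drop_zero, List.nil_append]
        rw [pvJoin_cons V (x :: L') (by simp)]
        rw [← hL, pvJoin_split s.length s le_rfl]
        simp
    · have hc' : pvCond s = false := by revert hc; cases pvCond s <;> simp
      rw [pvLoop, if_neg hc]
      split
      · rename_i heq
        have hL : PySem.Chars.splitOn s ['\r', '\n'] = [s] := by rw [pvSplit_part, heq]
        have hx : pvPred s = false := by rw [← pvCond_none s heq]; exact hc'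
        rw [hL, List.findIdx?_cons]
        simp [hx]
      · rename_i line rest heq
        have hse := pvPartition_eq s line rest heq
        have hL : PySem.Chars.splitOn s ['\r', '\n'] = line :: PySem.Chars.splitOn rest ['\r', '\n'] := by
          rw [pvSplit_part, heq]
        have hx : pvPred line = false := by rw [← pvCond_some s line rest heq]; exact hc'
        have hlen : rest.length < n := by
          have : s.length ≤ n := hs
          rw [hse] at this; simp at this; omega
        rw [ih rest.length hlen rest le_rfl (pre ++ line ++ ['\r', '\n'])]
        rw [hL, List.findIdx?_cons]
        simp only [hx, Bool.false_eq_true, if_false]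
        cases hf : (PySem.Chars.splitOn rest ['\r', '\n']).findIdx? pvPred with
        | none => simp
        | some i =>
          simp only [Option.map_some]
          rw [show (line :: PySem.Chars.splitOn rest ['\r', '\n']).take (i + 1)
                = line :: (PySem.Chars.splitOn rest ['\r', '\n']).take i by simp]
          rw [show (line :: PySem.Chars.splitOn rest ['\r', '\n']).drop (i + 1)
                = (PySem.Chars.splitOn rest ['\r', '\n']).drop i by simp]
          rw [List.cons_append, pvJoin_cons line _ (by simp)]
          simp

-- ===== VERDICT (by name: the statement is the Claim_ definition above) =====
theorem add_via_and_forward_py_spec : Claim_equal_add_via_and_forward_py := by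
  intro raw via _
  unfold Spec_add_via_and_forward_py add_via_and_forward_py add_via_and_forward_py_alt
  cases hp : pvPartition raw.toList with
  | none =>
    have hL : PySem.Chars.splitOn raw.toList ['\r', '\n'] = [raw.toList] := by
      rw [pvSplit_part, hp]
    simp only [hL, List.foldl_nil, Bool.not_false, if_true]
    rw [show (1 : Int) = ((1 : Nat) : Int) from rfl,
        PySem.List.insert_natCast _ 1 _ (by simp)]
    simp [PySem.Chars.join_cons_cons, PySem.Chars.join_singleton]
  | some p =>
    obtain ⟨h1, u1⟩ := p
    have hL : PySem.Chars.splitOn raw.toList ['\r', '\n']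
        = h1 :: PySem.Chars.splitOn u1 ['\r', '\n'] := by
      rw [pvSplit_part, hp]
    simp only [hL]
    rw [pvFold_false ("Via: ".toList ++ via.toList) (PySem.Chars.splitOn u1 ['\r', '\n']) [h1]]
    rw [pvLoop_eq ("Via: ".toList ++ via.toList) h1 u1 u1.length u1 le_rfl (h1 ++ ['\r', '\n'])]
    cases hf : (PySem.Chars.splitOn u1 ['\r', '\n']).findIdx? pvPred with
    | none =>
      simp only [Bool.not_false, if_true]
      rw [show (1 : Int) = ((1 : Nat) : Int) from rfl,
          PySem.List.insert_natCast _ 1 _ (by simp)]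
      rw [show List.take 1 ([h1] ++ PySem.Chars.splitOn u1 ['\r', '\n']) = [h1] by simp]
      rw [show List.drop 1 ([h1] ++ PySem.Chars.splitOn u1 ['\r', '\n'])
            = PySem.Chars.splitOn u1 ['\r', '\n'] by simp]
      rw [show ([h1] ++ ("Via: ".toList ++ via.toList) :: PySem.Chars.splitOn u1 ['\r', '\n'])
            = h1 :: ("Via: ".toList ++ via.toList) :: PySem.Chars.splitOn u1 ['\r', '\n'] by simp]
      rw [PySem.Chars.join_cons_cons]
      rw [pvJoin_cons _ _ (pvSplit_ne_nil u1)]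
      rw [pvJoin_split u1.length u1 le_rfl]
      simp
    | some i =>
      simp only [Bool.not_true, Bool.false_eq_true, if_false]
      rw [show ([h1] ++ List.take i (PySem.Chars.splitOn u1 ['\r', '\n'])
              ++ ("Via: ".toList ++ via.toList) :: List.drop i (PySem.Chars.splitOn u1 ['\r', '\n']))
            = h1 :: (List.take i (PySem.Chars.splitOn u1 ['\r', '\n'])
              ++ ("Via: ".toList ++ via.toList) :: List.drop i (PySem.Chars.splitOn u1 ['\r', '\n'])) by simp]
      rw [pvJoin_cons h1 _ (by simp)]
      simp
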